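-- pv_equiv track=rewrite | github.com/anderson-ufrj/AEDIII | scripts/fix_code_ultra_final.py | apply_proper_indentation
-- ===== SOURCE A (Python) =====
-- def apply_proper_indentation(lines):
--     """Aplica indentação correta baseada em C/C++."""
--     result = []
--     indent = 0
--
--     for line in lines:
--         stripped = line.strip()
--         if not stripped:
--             continue
--
--         # Diminui indentação se linha começa com }
--         if stripped.startswith('}'):
--             indent = max(0, indent - 1)
--
--         # Adiciona linha com indentação
--         result.append('    ' * indent + stripped)
--
--         # Aumenta indentação se termina com {
--         if stripped.endswith('{'):
--             indent += 1
--         # Se linha é }, diminui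
--         elif stripped == '}':
--             pass  # já diminuiu antes
--
--     # Agora adiciona linhas vazias apenas onde semanticamente apropriado
--     final = []
--     for i, line in enumerate(result):
--         final.append(line)
--
--         # Adiciona linha vazia após }  se próxima linha não for } e não for última
--         if i < len(result) - 1:
--             if line.strip().endswith('}') and not result[i + 1].strip().startswith('}'):
--                 # Mas não se for o último } da função
--                 if not (line.strip() == '}' and i + 1 < len(result) and result[i + 1].strip() == '}'):
--                     final.append('')
--
--     # Remove linha vazia final se existir
--     while final and final[-1] == '':
--         final.pop()
--
--     return '\n'.join(final)
-- ===== SOURCE B (Python) =====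
-- def apply_proper_indentation(lines):
--     """Aplica indentação correta baseada em C/C++ — single pass, blanks inserted on the fly."""
--     out = []
--     prev = None  # previous kept stripped line
--     indent = 0
--     for line in lines:
--         s = line.strip()
--         if not s:
--             continue
--         if s.startswith('}'):
--             indent = max(0, indent - 1)
--         if prev is not None and prev.endswith('}') and not s.startswith('}'):
--             out.append('')
--         out.append('    ' * indent + s)
--         if s.endswith('{'):
--             indent += 1
--         prev = s
--     return '\n'.join(out)
-- ===== Notes on version B (the rewrite author's own statement) =====
-- stated objective: simpler
-- what changed: Replaces A's three sequential passes (indent loop building 'result', a second enumerate loop with lookahead inserting blank lines, and a trailing-blank pop loop) with a single loop that tracks the previous kept stripped line and inserts the blank separator on the fly, so the second pass, its re-stripping of already-built lines, its dead inner guard, and the final pop all disappear.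
import Mathlib
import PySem

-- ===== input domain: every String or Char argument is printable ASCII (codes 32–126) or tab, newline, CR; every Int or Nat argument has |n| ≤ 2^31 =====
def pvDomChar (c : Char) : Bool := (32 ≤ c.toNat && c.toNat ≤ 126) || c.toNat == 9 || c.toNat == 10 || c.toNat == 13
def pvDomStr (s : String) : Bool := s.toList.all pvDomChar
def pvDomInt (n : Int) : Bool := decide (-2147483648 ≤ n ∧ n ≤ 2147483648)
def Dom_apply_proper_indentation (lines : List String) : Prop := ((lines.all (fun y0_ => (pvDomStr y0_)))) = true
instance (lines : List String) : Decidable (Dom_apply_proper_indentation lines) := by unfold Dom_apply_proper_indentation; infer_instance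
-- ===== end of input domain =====

-- B re-implements A's three fix-up passes (indent, then insert blanks by lookahead, then pop trailing
-- blanks) as ONE loop that inserts the blank separator on the fly; objective: simpler.

-- ===== PORT A =====
-- blank-insertion condition of A's second loop on the pair (line, next line);
-- the 'i + 1 < len(result)' conjunct of the inner guard is True in this branch and is dropped.
def pvCondA (a b : List Char) : Bool :=
  PySem.Chars.endswith (PySem.Chars.strip a) ['}']
    && !(PySem.Chars.startswith (PySem.Chars.strip b) ['}'])
    && !(PySem.Chars.strip a == ['}'] && PySem.Chars.strip b == ['}'])

-- body of A's first loop for a kept (non-blank) stripped line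
-- ('elif stripped == "}" : pass' does nothing and is not represented)
def pvAStep (st : List (List Char) × Int) (stripped : List Char) : List (List Char) × Int :=
  let indent := if PySem.Chars.startswith stripped ['}'] then max 0 (st.2 - 1) else st.2
  (st.1 ++ [PySem.List.pyRepeat "    ".toList indent ++ stripped],
   if PySem.Chars.endswith stripped ['{'] then indent + 1 else indent)

-- A's second loop: each line is emitted, and when a next line exists and pvCondA holds, a '' after it
def pvPass2 : List (List Char) → List (List Char)
  | [] => []
  | [x] => [x]
  | x :: y :: rest =>
      x :: (if pvCondA x y then [] :: pvPass2 (y :: rest) else pvPass2 (y :: rest))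

-- A's trailing 'while final and final[-1] == "": final.pop()'
def pvPopBlank : List (List Char) → List (List Char)
  | [] => []
  | x :: xs =>
      match pvPopBlank xs with
      | [] => if x = [] then [] else [x]
      | ys => x :: ys

def apply_proper_indentation (lines : List String) : String :=
  let p := lines.foldl (fun st line =>
      let s := PySem.Chars.strip line.toList
      if s.isEmpty then st else pvAStep st s)
    (([], 0) : List (List Char) × Int)
  String.ofList (PySem.Chars.join ['\n'] (pvPopBlank (pvPass2 p.1)))

-- ===== PORT B =====
-- body of B's (single) loop for a kept stripped line; state = (out, prev kept stripped line, indent)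
def pvBStep (st : List (List Char) × Option (List Char) × Int) (s : List Char) :
    List (List Char) × Option (List Char) × Int :=
  let indent := if PySem.Chars.startswith s ['}'] then max 0 (st.2.2 - 1) else st.2.2
  let out := (match st.2.1 with
    | some p =>
        if PySem.Chars.endswith p ['}'] && !(PySem.Chars.startswith s ['}'])
        then st.1 ++ [[]] else st.1
    | none => st.1) ++ [PySem.List.pyRepeat "    ".toList indent ++ s]
  (out, some s, if PySem.Chars.endswith s ['{'] then indent + 1 else indent)

def apply_proper_indentation_alt (lines : List String) : String :=
  let st := lines.foldl (fun st line =>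
      let s := PySem.Chars.strip line.toList
      if s.isEmpty then st else pvBStep st s)
    (([], none, 0) : List (List Char) × Option (List Char) × Int)
  String.ofList (PySem.Chars.join ['\n'] st.1)

-- ===== PRECONDITION & SPEC =====
def Spec_apply_proper_indentation (lines : List String) (out : String) : Prop := out = apply_proper_indentation_alt lines
instance (lines : List String) (out : String) : Decidable (Spec_apply_proper_indentation lines out) := by unfold Spec_apply_proper_indentation; infer_instance

-- ===== CLAIM (what is proved, stated in full; the proofs are below) =====
def Claim_equal_apply_proper_indentation : Prop := ∀ (lines : List String), Dom_apply_proper_indentation lines → Spec_apply_proper_indentation lines (apply_proper_indentation lines)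

-- ===== LEMMAS AND PROOFS =====

-- the kept stripped lines
def pvS (lines : List String) : List (List Char) :=
  (lines.map (fun l => PySem.Chars.strip l.toList)).filter (fun s => !s.isEmpty)

-- a skip-blank fold over the raw lines is a fold over the kept stripped lines
theorem pv_skipFold {σ : Type} (F : σ → List Char → σ) :
    ∀ (lines : List String) (st : σ),
      lines.foldl (fun st line =>
        let s := PySem.Chars.strip line.toList
        if s.isEmpty then st else F st s) st
      = (pvS lines).foldl F st := by
  intro lines
  induction lines with
  | nil => intro st; rfl
  | cons l ls ih =>
      intro st
      rw [List.foldl_cons, ih]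
      by_cases h : PySem.Chars.strip l.toList = []
      · simp [pvS, List.map_cons, h]
      · simp [pvS, List.map_cons, h]

theorem pv_dw_idem (p : Char → Bool) (l : List Char) :
    List.dropWhile p (List.dropWhile p l) = List.dropWhile p l := by
  induction l with
  | nil => rfl
  | cons a t ih =>
      by_cases h : p a
      · simp [h, ih]
      · simp [h]

theorem pv_rstrip_prefix (X : List Char) : PySem.Chars.rstrip X <+: X := by
  unfold PySem.Chars.rstrip
  have h : List.dropWhile PySem.Chars.isspace X.reverse <:+ X.reverse :=
    ⟨List.takeWhile PySem.Chars.isspace X.reverse, List.takeWhile_append_dropWhile⟩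
  have := List.reverse_prefix.mpr h
  simpa using this

theorem pv_lstrip_rstrip (X : List Char)
    (hX : List.dropWhile PySem.Chars.isspace X = X) :
    List.dropWhile PySem.Chars.isspace (PySem.Chars.rstrip X) = PySem.Chars.rstrip X := by
  rcases hpre : PySem.Chars.rstrip X with _ | ⟨a, t⟩
  · rfl
  · have hp : (a :: t) <+: X := by rw [← hpre]; exact pv_rstrip_prefix X
    obtain ⟨u, hu⟩ := hp
    by_cases ha : PySem.Chars.isspace a
    · exfalso
      have h1 : List.dropWhile PySem.Chars.isspace X = List.dropWhile PySem.Chars.isspace (t ++ u) := by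
        rw [← hu]; simp [ha]
      have h2 : (List.dropWhile PySem.Chars.isspace (t ++ u)).length ≤ (t ++ u).length :=
        List.length_dropWhile_le _ _
      have h3 : X.length = (t ++ u).length + 1 := by rw [← hu]; simp
      rw [hX] at h1
      have hlen : X.length ≤ (t ++ u).length := by
        rw [h1]; exact h2
      omega
    · simp [ha]

theorem pv_rstrip_idem (y : List Char) :
    PySem.Chars.rstrip (PySem.Chars.rstrip y) = PySem.Chars.rstrip y := by
  unfold PySem.Chars.rstrip
  rw [List.reverse_reverse, pv_dw_idem]

theorem pv_strip_idem (s : List Char) :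
    PySem.Chars.strip (PySem.Chars.strip s) = PySem.Chars.strip s := by
  unfold PySem.Chars.strip PySem.Chars.lstrip
  rw [pv_lstrip_rstrip (List.dropWhile PySem.Chars.isspace s) (pv_dw_idem _ s),
      pv_rstrip_idem]

theorem pv_spaces_dw (n : Int) :
    List.dropWhile PySem.Chars.isspace (PySem.List.pyRepeat "    ".toList n) = [] := by
  rw [List.dropWhile_eq_nil_iff]
  intro x hx
  have hsp : "    ".toList = [' ', ' ', ' ', ' '] := rfl
  simp only [PySem.List.pyRepeat, List.mem_flatten, List.mem_replicate] at hx
  obtain ⟨l, ⟨-, rfl⟩, hxl⟩ := hx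
  rw [hsp] at hxl
  simp only [List.mem_cons, List.not_mem_nil, or_false] at hxl
  rcases hxl with rfl | rfl | rfl | rfl <;> decide

theorem pv_strip_sp (n : Int) (s : List Char) :
    PySem.Chars.strip (PySem.List.pyRepeat "    ".toList n ++ s) = PySem.Chars.strip s := by
  unfold PySem.Chars.strip PySem.Chars.lstrip
  rw [List.dropWhile_append, pv_spaces_dw]
  simp

theorem pv_S_spec (lines : List String) :
    ∀ s ∈ pvS lines, PySem.Chars.strip s = s ∧ s ≠ [] := by
  intro s hs
  unfold pvS at hs
  rw [List.mem_filter] at hs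
  obtain ⟨hmem, hne⟩ := hs
  rw [List.mem_map] at hmem
  obtain ⟨l, -, rfl⟩ := hmem
  refine ⟨pv_strip_idem l.toList, ?_⟩
  simpa using hne

theorem pv_pass2_append (x g : List Char) :
    ∀ (r : List (List Char)),
      pvPass2 (r ++ [g] ++ [x])
      = pvPass2 (r ++ [g]) ++ (if pvCondA g x then [([] : List Char)] else []) ++ [x] := by
  intro r
  induction r with
  | nil => by_cases h : pvCondA g x <;> simp [pvPass2, h]
  | cons a r' ih =>
      cases r' with
      | nil =>
          by_cases h1 : pvCondA a g <;> by_cases h2 : pvCondA g x <;>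
            simp [pvPass2, h1, h2]
      | cons b r'' =>
          simp only [List.append_assoc, List.cons_append, List.nil_append] at ih ⊢
          by_cases h1 : pvCondA a b <;> simp [pvPass2, h1, ih]

theorem pv_pass2_ne_nil (l : List (List Char)) (h : l ≠ []) : pvPass2 l ≠ [] := by
  match l with
  | [] => exact absurd rfl h
  | [x] => simp [pvPass2]
  | x :: y :: rest => simp [pvPass2]

theorem pv_pass2_getLast? (l : List (List Char)) : (pvPass2 l).getLast? = l.getLast? := by
  induction l using pvPass2.induct with
  | case1 => rfl
  | case2 x => rfl
  | case3 x y rest ih =>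
      have hne : pvPass2 (y :: rest) ≠ [] := pv_pass2_ne_nil _ (by simp)
      obtain ⟨z, zs, hz⟩ := List.exists_cons_of_ne_nil hne
      rw [hz] at ih
      by_cases h : pvCondA x y <;>
        simp [pvPass2, h, hz, List.getLast?_cons_cons, ih]

theorem pv_popBlank_id (l : List (List Char)) (h : ∀ x, l.getLast? = some x → x ≠ []) :
    pvPopBlank l = l := by
  induction l with
  | nil => rfl
  | cons x xs ih =>
      cases xs with
      | nil =>
          have hx : x ≠ [] := h x (by simp)
          simp [pvPopBlank, hx]
      | cons y ys =>
          have h' : ∀ z, (y :: ys).getLast? = some z → z ≠ [] := by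
            intro z hz
            exact h z (by rw [List.getLast?_cons_cons]; exact hz)
          have ih' : pvPopBlank (y :: ys) = y :: ys := ih h'
          rw [show pvPopBlank (x :: y :: ys)
                = (match pvPopBlank (y :: ys) with
                   | [] => if x = [] then [] else [x]
                   | ys' => x :: ys') from rfl, ih']

theorem pv_stepEq (s : List Char) (hs1 : PySem.Chars.strip s = s)
    (r : List (List Char)) (i : Int) :
    pvBStep (pvPass2 r, r.getLast?.map PySem.Chars.strip, i) s
    = (pvPass2 (pvAStep (r, i) s).1,
       (pvAStep (r, i) s).1.getLast?.map PySem.Chars.strip,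
       (pvAStep (r, i) s).2) := by
  unfold pvAStep pvBStep
  simp only []
  set ind := if PySem.Chars.startswith s ['}'] then max 0 (i - 1) else i with hind
  set new := PySem.List.pyRepeat "    ".toList ind ++ s with hnew
  have hstripnew : PySem.Chars.strip new = s := by rw [hnew, pv_strip_sp, hs1]
  refine Prod.ext ?_ (Prod.ext ?_ rfl)
  · -- out components
    rcases List.eq_nil_or_concat r with rfl | ⟨r₀, g, rfl⟩
    · simp [pvPass2]
    · have hpa := pv_pass2_append new g r₀
      have hcond : pvCondA g new
          = (PySem.Chars.endswith (PySem.Chars.strip g) ['}'] && !(PySem.Chars.startswith s ['}'])) := by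
        unfold pvCondA
        rw [hstripnew]
        by_cases hst : PySem.Chars.startswith s ['}']
        · simp [hst]
        · have hne : s ≠ ['}'] := by
            intro hq
            rw [hq] at hst
            exact hst (by decide)
          have hbeq : (s == ['}']) = false := by
            rw [beq_eq_false_iff_ne]
            exact hne
          simp [hst, hbeq]
      simp only [List.concat_eq_append, List.getLast?_concat, Option.map_some]
      rw [hpa, hcond]
      by_cases hc : (PySem.Chars.endswith (PySem.Chars.strip g) ['}'] && !(PySem.Chars.startswith s ['}'])) = true
      · simp [hc]
      · simp [hc]
  · -- prev components
    simp [hstripnew]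

theorem pv_main :
    ∀ (S : List (List Char)), (∀ s ∈ S, PySem.Chars.strip s = s ∧ s ≠ []) →
    ∀ (r : List (List Char)) (i : Int),
      S.foldl pvBStep (pvPass2 r, r.getLast?.map PySem.Chars.strip, i)
      = (pvPass2 (S.foldl pvAStep (r, i)).1,
         (S.foldl pvAStep (r, i)).1.getLast?.map PySem.Chars.strip,
         (S.foldl pvAStep (r, i)).2) := by
  intro S
  induction S with
  | nil => intro _ r i; rfl
  | cons s S' ih =>
      intro hS r i
      have hs := hS s (by simp)
      have hS' : ∀ t ∈ S', PySem.Chars.strip t = t ∧ t ≠ [] := fun t ht => hS t (by simp [ht])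
      rw [List.foldl_cons, List.foldl_cons, pv_stepEq s hs.1 r i]
      have := ih hS' (pvAStep (r, i) s).1 (pvAStep (r, i) s).2
      simpa using this

theorem pv_lastA :
    ∀ (S : List (List Char)), (∀ s ∈ S, s ≠ []) →
    ∀ (r : List (List Char)) (i : Int),
      (∀ x, r.getLast? = some x → x ≠ []) →
      ∀ x, (S.foldl pvAStep (r, i)).1.getLast? = some x → x ≠ [] := by
  intro S
  induction S with
  | nil => intro _ r i hr; exact hr
  | cons s S' ih =>
      intro hS r i hr
      rw [List.foldl_cons]
      have hs : s ≠ [] := hS s (by simp)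
      have hr' : ∀ x, (pvAStep (r, i) s).1.getLast? = some x → x ≠ [] := by
        intro x hx
        unfold pvAStep at hx
        simp only [List.getLast?_concat, Option.some.injEq] at hx
        intro hnil
        rw [← hx] at hnil
        rcases List.append_eq_nil_iff.mp hnil with ⟨-, hs'⟩
        exact hs hs'
      have := ih (fun t ht => hS t (by simp [ht])) (pvAStep (r, i) s).1 (pvAStep (r, i) s).2 hr'
      simpa using this

-- ===== VERDICT (by name: the statement is the Claim_ definition above) =====
theorem apply_proper_indentation_spec : Claim_equal_apply_proper_indentation := by
  intro lines _
  unfold Spec_apply_proper_indentation apply_proper_indentation apply_proper_indentation_alt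
  rw [pv_skipFold pvAStep lines (([], 0) : List (List Char) × Int),
      pv_skipFold pvBStep lines (([], none, 0) : List (List Char) × Option (List Char) × Int)]
  have hM := pv_main (pvS lines) (pv_S_spec lines) [] 0
  have hL := pv_lastA (pvS lines) (fun s hs => (pv_S_spec lines s hs).2) [] 0 (by simp)
  simp only [pvPass2, List.getLast?_nil, Option.map_none] at hM
  rw [hM]
  have hpop := pv_popBlank_id (pvPass2 (List.foldl pvAStep ([], 0) (pvS lines)).1) (by
    intro x hx
    rw [pv_pass2_getLast?] at hx
    exact hL x hx)
  simp only [hpop]
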